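-- pv_equiv track=rewrite | github.com/IBM/AMR-CSLogic | amr_verbnet_semantics/core/amr_verbnet_enhance.py | get_event_from_argument
-- ===== SOURCE A (Python) =====
-- def get_event_from_argument(argument):
--     """
--     Infer event from arguments (basically for VerbNet 3.2 semantics)
--     :param argument:
--     :return:
--     """
--     argument = argument.strip()
--     prefixes = ["start(", "end(", "during(", "result("]
--     for pre in prefixes:
--         if argument.startswith(pre) and argument.endswith(")"):
--             event = argument[len(pre):-1]
--             event_time_point = pre[:-1]
--             return event, event_time_point
--     return None, None
-- ===== SOURCE B (Python) =====
-- def get_event_from_argument(argument):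
--     argument = argument.strip()
--     if not argument.endswith(")") or "(" not in argument:
--         return None, None
--     idx = argument.index("(")
--     tp = argument[:idx]
--     if tp in ("start", "end", "during", "result"):
--         return argument[idx + 1:-1], tp
--     return None, None
-- ===== Notes on version B (the rewrite author's own statement) =====
-- stated objective: simpler
-- what changed: B strips the string, splits it once at its first opening parenthesis (after checking the trailing closing parenthesis), and validates the extracted time-point with a single membership test, instead of A's loop trying four prefixes with startswith/endswith and re-slicing per prefix.
import Mathlib
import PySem

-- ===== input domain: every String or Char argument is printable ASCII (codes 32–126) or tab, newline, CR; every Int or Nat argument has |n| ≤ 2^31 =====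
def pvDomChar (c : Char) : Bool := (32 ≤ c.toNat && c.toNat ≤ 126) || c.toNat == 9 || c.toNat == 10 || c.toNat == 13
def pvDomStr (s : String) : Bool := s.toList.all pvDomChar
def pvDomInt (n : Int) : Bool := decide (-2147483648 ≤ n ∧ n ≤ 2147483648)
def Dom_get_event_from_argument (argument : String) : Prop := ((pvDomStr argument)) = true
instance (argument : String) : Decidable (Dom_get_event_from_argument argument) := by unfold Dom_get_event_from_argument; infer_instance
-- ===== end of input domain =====

-- B parses the string once at its first '(' and validates the time-point by a single
-- membership test, instead of A's loop over four startswith/endswith prefix probes (objective: simpler).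

-- ===== PORT A =====
-- the 'for pre in prefixes' loop, returning at the first matching prefix
def getEventLoop (a : String) : List String → Option String × Option String
  | [] => (none, none)
  | pre :: rest =>
    if PySem.Str.startswith a pre && PySem.Str.endswith a ")" then
      (some (PySem.Str.slice a (some ((PySem.Str.len pre : Int))) (some (-1))),
       some (PySem.Str.slice pre none (some (-1))))
    else getEventLoop a rest

def get_event_from_argument (argument : String) : Option String × Option String :=
  let a := PySem.Str.strip argument
  getEventLoop a ["start(", "end(", "during(", "result("]

-- ===== PORT B =====
def get_event_from_argument_alt (argument : String) : Option String × Option String :=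
  let a := PySem.Str.strip argument
  if !PySem.Str.endswith a ")" || !PySem.Str.isIn "(" a then (none, none)
  else
    -- a.index("(") : exact here because the guard ensures "(" occurs in a, so find = index
    let idx := PySem.Str.find a "("
    let tp := PySem.Str.slice a none (some idx)
    if ["start", "end", "during", "result"].contains tp then
      (some (PySem.Str.slice a (some (idx + 1)) (some (-1))), some tp)
    else (none, none)

-- ===== PRECONDITION & SPEC =====
def Spec_get_event_from_argument (argument : String) (out : Option String × Option String) : Prop := out = get_event_from_argument_alt argument
instance (argument : String) (out : Option String × Option String) : Decidable (Spec_get_event_from_argument argument out) := by unfold Spec_get_event_from_argument; infer_instance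

-- ===== CLAIM (what is proved, stated in full; the proofs are below) =====
def Claim_equal_get_event_from_argument : Prop := ∀ (argument : String), Dom_get_event_from_argument argument → Spec_get_event_from_argument argument (get_event_from_argument argument)

-- ===== LEMMAS AND PROOFS =====

-- If cs = w ++ '(' ++ t with no '(' in w, the first '(' of cs sits exactly at index w.length.
theorem find_paren_eq (cs w : List Char) (hw : '(' ∉ w) (h : (w ++ ['(']) <+: cs) :
    PySem.Chars.find cs ['('] = (w.length : Int) := by
  obtain ⟨t, ht⟩ := h
  have hcs : cs = w ++ '(' :: t := by rw [← ht]; simp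
  have hinf : ['('] <:+: cs := ⟨w, t, by simp [hcs]⟩
  have hf : 0 ≤ PySem.Chars.find cs ['('] := (PySem.Chars.find_nonneg_iff _ _).mpr hinf
  obtain ⟨hat, hmin⟩ := PySem.Chars.find_spec hf
  set n := (PySem.Chars.find cs ['(']).toNat with hn
  have hle : n ≤ w.length := by
    by_contra hlt
    refine hmin w.length (by omega) ?_
    refine ⟨t, ?_⟩
    rw [hcs, List.drop_left]
    rfl
  have hge : w.length ≤ n := by
    by_contra h'
    push Not at h'
    obtain ⟨u, hu⟩ := hat
    have h0 : cs[n]? = some '(' := by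
      have hd : (cs.drop n)[0]? = some '(' := by rw [← hu]; rfl
      rw [List.getElem?_drop] at hd
      simpa using hd
    have h1 : w[n]? = some '(' := by
      rw [hcs, List.getElem?_append_left (by simpa using h')] at h0
      exact h0
    exact hw (List.mem_of_getElem? h1)
  have hnw : n = w.length := le_antisymm hle hge
  rw [← Int.toNat_of_nonneg hf, ← hn, hnw]

-- Conversely: if cs.take (find) = w then w ++ "(" is a prefix of cs.
theorem prefix_of_take_find (cs w : List Char) (hf : 0 ≤ PySem.Chars.find cs ['('])
    (htake : cs.take (PySem.Chars.find cs ['(']).toNat = w) :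
    (w ++ ['(']) <+: cs := by
  obtain ⟨hat, _⟩ := PySem.Chars.find_spec hf
  obtain ⟨u, hu⟩ := hat
  refine ⟨u, ?_⟩
  calc (w ++ ['(']) ++ u = w ++ (['('] ++ u) := by simp
    _ = cs.take (PySem.Chars.find cs ['(']).toNat ++ cs.drop (PySem.Chars.find cs ['(']).toNat := by
        rw [htake, hu]
    _ = cs := List.take_append_drop _ _

-- the two ports agree on the stripped string
-- a string starting with w ++ "(" (w free of '(') determines B's parse: find, the slice tp, and membership of '('
theorem matched_case (a w p : String) (hw : '(' ∉ w.toList)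
    (hp : p.toList = w.toList ++ ['('])
    (h : PySem.Str.startswith a p = true) :
    PySem.Str.find a "(" = (w.toList.length : Int) ∧
    PySem.Str.slice a none (some (w.toList.length : Int)) = w ∧
    PySem.Str.isIn "(" a = true := by
  have hsw : p.toList <+: a.toList := by
    rw [PySem.Str.startswith_eq] at h
    exact (PySem.Chars.startswith_iff _ _).mp h
  rw [hp] at hsw
  have hfind : PySem.Chars.find a.toList ['('] = (w.toList.length : Int) :=
    find_paren_eq a.toList w.toList hw hsw
  refine ⟨?_, ?_, ?_⟩
  · rw [PySem.Str.find_eq]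
    simpa using hfind
  · apply String.toList_inj.mp
    rw [PySem.Str.toList_slice, PySem.Chars.slice_eq_listSlice,
        PySem.List.slice_to_natCast]
    have hpw : w.toList <+: a.toList := (List.prefix_append w.toList ['(']).trans hsw
    exact (List.prefix_iff_eq_take.mp hpw).symm
  · rw [PySem.Str.isIn_eq]
    refine (PySem.Chars.isIn_iff_infix _ _).mpr ?_
    obtain ⟨t, ht⟩ := hsw
    exact ⟨w.toList, t, by simpa using ht⟩

-- tp one of the four time-points forces the corresponding prefix of A to match
theorem startswith_of_tp (a w p : String) (hp : p.toList = w.toList ++ ['('])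
    (hin : PySem.Str.isIn "(" a = true)
    (htp : PySem.Str.slice a none (some (PySem.Str.find a "(")) = w) :
    PySem.Str.startswith a p = true := by
  have hf : 0 ≤ PySem.Chars.find a.toList ['('] := by
    rw [PySem.Str.isIn_eq] at hin
    exact (PySem.Chars.find_nonneg_iff _ _).mpr ((PySem.Chars.isIn_iff_infix _ _).mp (by simpa using hin))
  have htake : a.toList.take (PySem.Chars.find a.toList ['(']).toNat = w.toList := by
    have h' := congrArg String.toList htp
    have hparen : ("(" : String).toList = ['('] := rfl
    rw [PySem.Str.toList_slice, PySem.Chars.slice_eq_listSlice, PySem.Str.find_eq, hparen] at h'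
    rw [PySem.List.slice_to _ hf] at h'
    exact h'
  have := prefix_of_take_find a.toList w.toList hf htake
  rw [PySem.Str.startswith_eq]
  refine (PySem.Chars.startswith_iff _ _).mpr ?_
  rw [hp]
  exact this

theorem core_eq (a : String) :
    getEventLoop a ["start(", "end(", "during(", "result("] =
      (if !PySem.Str.endswith a ")" || !PySem.Str.isIn "(" a then ((none, none) : Option String × Option String)
       else
         let idx := PySem.Str.find a "("
         let tp := PySem.Str.slice a none (some idx)
         if ["start", "end", "during", "result"].contains tp then
           (some (PySem.Str.slice a (some (idx + 1)) (some (-1))), some tp)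
         else (none, none)) := by
  by_cases hend : PySem.Str.endswith a ")" = true
  · by_cases h1 : PySem.Str.startswith a "start(" = true
    · obtain ⟨hfind, hslice, hin⟩ := matched_case a "start" "start(" (by decide) (by decide) h1
      simp at hfind hslice
      simp at h1 hend hin
      simp [getEventLoop, h1, hend, hin, hfind, hslice,
        show PySem.Str.slice "start(" none (some (-1)) = "start" from by decide]
    · by_cases h2 : PySem.Str.startswith a "end(" = true
      · obtain ⟨hfind, hslice, hin⟩ := matched_case a "end" "end(" (by decide) (by decide) h2
        simp at hfind hslice
        simp at h1 h2 hend hin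
        simp [getEventLoop, h1, h2, hend, hin, hfind, hslice,
          show PySem.Str.slice "end(" none (some (-1)) = "end" from by decide]
      · by_cases h3 : PySem.Str.startswith a "during(" = true
        · obtain ⟨hfind, hslice, hin⟩ := matched_case a "during" "during(" (by decide) (by decide) h3
          simp at hfind hslice
          simp at h1 h2 h3 hend hin
          simp [getEventLoop, h1, h2, h3, hend, hin, hfind, hslice,
            show PySem.Str.slice "during(" none (some (-1)) = "during" from by decide]
        · by_cases h4 : PySem.Str.startswith a "result(" = true
          · obtain ⟨hfind, hslice, hin⟩ := matched_case a "result" "result(" (by decide) (by decide) h4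
            simp at hfind hslice
            simp at h1 h2 h3 h4 hend hin
            simp [getEventLoop, h1, h2, h3, h4, hend, hin, hfind, hslice,
              show PySem.Str.slice "result(" none (some (-1)) = "result" from by decide]
          · by_cases hin : PySem.Str.isIn "(" a = true
            · have hne1 : PySem.Str.slice a none (some (PySem.Str.find a "(")) ≠ "start" :=
                fun h => h1 (startswith_of_tp a "start" "start(" (by decide) hin h)
              have hne2 : PySem.Str.slice a none (some (PySem.Str.find a "(")) ≠ "end" :=
                fun h => h2 (startswith_of_tp a "end" "end(" (by decide) hin h)
              have hne3 : PySem.Str.slice a none (some (PySem.Str.find a "(")) ≠ "during" :=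
                fun h => h3 (startswith_of_tp a "during" "during(" (by decide) hin h)
              have hne4 : PySem.Str.slice a none (some (PySem.Str.find a "(")) ≠ "result" :=
                fun h => h4 (startswith_of_tp a "result" "result(" (by decide) hin h)
              simp at hne1 hne2 hne3 hne4
              simp at h1 h2 h3 h4 hend hin
              simp [getEventLoop, h1, h2, h3, h4, hend, hin, hne1, hne2, hne3, hne4]
            · simp only [Bool.not_eq_true] at hin
              simp at h1 h2 h3 h4 hend hin
              simp [getEventLoop, h1, h2, h3, h4, hend, hin]
  · simp only [Bool.not_eq_true] at hend
    simp at hend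
    simp [getEventLoop, hend]

-- ===== VERDICT (by name: the statement is the Claim_ definition above) =====
theorem get_event_from_argument_spec : Claim_equal_get_event_from_argument := by
  intro argument _
  unfold Spec_get_event_from_argument get_event_from_argument get_event_from_argument_alt
  exact core_eq (PySem.Str.strip argument)
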